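-- pv_equiv track=rewrite | github.com/GuyShemesh66/python-projects | hw3_matchingmarket.py | _compute_preferred_choice_graph
-- ===== SOURCE A (Python) =====
-- def _compute_preferred_choice_graph(n, m, V, P):
--     """Compute the preferred choice graph based on valuations and prices."""
--     C = [[0 for _ in range(m)] for _ in range(n)]
--     for i in range(n):
--         max_utility = max(V[i][k] - P[k] for k in range(m))
--         for j in range(m):
--             if V[i][j] - P[j] == max_utility:
--                 C[i][j] = 1
--     return C
-- ===== SOURCE B (Python) =====
-- def _compute_preferred_choice_graph(n, m, V, P):
--     """Single online pass per row: keep running best utility and tied column indices."""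
--     C = []
--     for i in range(n):
--         best = None
--         ties = []
--         for j in range(m):
--             u = V[i][j] - P[j]
--             if best is None or u > best:
--                 best = u
--                 ties = [j]
--             elif u == best:
--                 ties.append(j)
--         row = [0] * m
--         for j in ties:
--             row[j] = 1
--         C.append(row)
--     return C
-- ===== Notes on version B (the rewrite author's own statement) =====
-- stated objective: alternative
-- what changed: Per row, one online scan maintains the running max utility and the list of tied column indices (reset on a strictly greater utility, append on a tie), then marks those indices, replacing A's two sequential passes (max() then a full compare scan); rows are appended instead of preallocated and mutated.
import Mathlib
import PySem

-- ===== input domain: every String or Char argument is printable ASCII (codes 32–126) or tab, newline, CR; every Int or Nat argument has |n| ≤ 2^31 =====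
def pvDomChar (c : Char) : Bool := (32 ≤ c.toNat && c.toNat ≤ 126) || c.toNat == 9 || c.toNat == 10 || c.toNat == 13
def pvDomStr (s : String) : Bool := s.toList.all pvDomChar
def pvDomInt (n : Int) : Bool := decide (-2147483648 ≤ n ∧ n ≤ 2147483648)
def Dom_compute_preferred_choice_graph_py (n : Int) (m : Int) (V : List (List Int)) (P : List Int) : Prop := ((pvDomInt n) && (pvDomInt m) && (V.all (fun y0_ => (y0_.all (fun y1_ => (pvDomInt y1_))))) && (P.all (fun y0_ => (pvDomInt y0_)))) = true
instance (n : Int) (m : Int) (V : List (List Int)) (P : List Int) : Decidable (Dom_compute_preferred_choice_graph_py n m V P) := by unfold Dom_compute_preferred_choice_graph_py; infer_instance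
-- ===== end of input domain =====

-- B replaces A's two passes per row (max(), then a compare scan marking a preallocated
-- zero matrix) by one online scan keeping the running best utility and the tied column
-- indices, appending each finished row; objective: alternative (same cost).

-- ===== PORT A =====
-- shared subexpression of both Pythons: the utility V[i][j] - P[j]
def pvUtil (Vi : List Int) (P : List Int) (j : Int) : Int :=
  (PySem.List.pyGet? Vi j).getD 0 - (PySem.List.pyGet? P j).getD 0

-- body of A's outer loop: max over the row, then mark every tying column of C[i]
def pvStepA (m : Int) (V : List (List Int)) (P : List Int) (C : List (List Int)) (i : Int) : List (List Int) :=
  let Vi := (PySem.List.pyGet? V i).getD []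
  match PySem.List.max? ((PySem.List.pyRange 0 m).map (fun k => pvUtil Vi P k)) (fun y => y) with
  | none => C  -- Python raises ValueError here (empty generator, m ≤ 0); excluded by Pre_
  | some mu =>
      (PySem.List.pyRange 0 m).foldl (fun C j =>
        if pvUtil Vi P j = mu
        then C.set i.toNat (((PySem.List.pyGet? C i).getD []).set j.toNat 1)
        else C) C

def compute_preferred_choice_graph_py (n : Int) (m : Int) (V : List (List Int)) (P : List Int) : List (List Int) :=
  let C0 := (PySem.List.pyRange 0 n).map (fun _ => (PySem.List.pyRange 0 m).map (fun _ => (0 : Int)))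
  (PySem.List.pyRange 0 n).foldl (pvStepA m V P) C0

-- ===== PORT B =====
-- body of B's inner loop: running best utility (None at start) and tied indices
def pvScanStep (u : Int → Int) (st : Option Int × List Int) (j : Int) : Option Int × List Int :=
  match st.1 with
  | none => (some (u j), [j])
  | some b => if u j > b then (some (u j), [j]) else if u j = b then (some b, st.2 ++ [j]) else st

-- body of B's outer loop: one scan, then mark the tied indices in a fresh zero row
def pvStepB (m : Int) (V : List (List Int)) (P : List Int) (C : List (List Int)) (i : Int) : List (List Int) :=
  let Vi := (PySem.List.pyGet? V i).getD []
  let st := (PySem.List.pyRange 0 m).foldl (pvScanStep (pvUtil Vi P)) (none, [])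
  let row := st.2.foldl (fun r j => r.set j.toNat 1) (List.replicate m.toNat (0 : Int))
  C ++ [row]

def compute_preferred_choice_graph_py_alt (n : Int) (m : Int) (V : List (List Int)) (P : List Int) : List (List Int) :=
  (PySem.List.pyRange 0 n).foldl (pvStepB m V P) []

-- ===== PRECONDITION & SPEC =====
-- Pre_ excludes exactly the inputs where Python A raises: ValueError from max() of an
-- empty generator when n ≥ 1 and m ≤ 0, and IndexError when V has fewer than n rows,
-- a used row of V is shorter than m, or P is shorter than m.
def Pre_compute_preferred_choice_graph_py (n : Int) (m : Int) (V : List (List Int)) (P : List Int) : Prop :=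
  n ≤ 0 ∨ (1 ≤ m ∧ n ≤ (V.length : Int) ∧ m ≤ (P.length : Int) ∧ ∀ r ∈ V.take n.toNat, m ≤ (r.length : Int))
instance (n : Int) (m : Int) (V : List (List Int)) (P : List Int) : Decidable (Pre_compute_preferred_choice_graph_py n m V P) := by unfold Pre_compute_preferred_choice_graph_py; infer_instance

def pvWitness_compute_preferred_choice_graph_py : Int × Int × List (List Int) × List Int := (1, 1, [[5]], [2])

def Spec_compute_preferred_choice_graph_py (n : Int) (m : Int) (V : List (List Int)) (P : List Int) (out : List (List Int)) : Prop := out = compute_preferred_choice_graph_py_alt n m V P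
instance (n : Int) (m : Int) (V : List (List Int)) (P : List Int) (out : List (List Int)) : Decidable (Spec_compute_preferred_choice_graph_py n m V P out) := by unfold Spec_compute_preferred_choice_graph_py; infer_instance

-- ===== CLAIM (what is proved, stated in full; the proofs are below) =====
def Claim_equal_compute_preferred_choice_graph_py : Prop := ∀ (n : Int) (m : Int) (V : List (List Int)) (P : List Int), Dom_compute_preferred_choice_graph_py n m V P → Pre_compute_preferred_choice_graph_py n m V P → Spec_compute_preferred_choice_graph_py n m V P (compute_preferred_choice_graph_py n m V P)

-- ===== LEMMAS AND PROOFS =====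

-- B's per-iteration row, named for the proofs
def pvRowB (m : Int) (u : Int → Int) : List Int :=
  ((PySem.List.pyRange 0 m).foldl (pvScanStep u) (none, [])).2.foldl
    (fun r j => r.set j.toNat 1) (List.replicate m.toNat (0 : Int))

lemma pvRange_zero_eq (n : Int) :
    PySem.List.pyRange 0 n = (List.range n.toNat).map (Int.ofNat) := by
  by_cases h : n ≤ 0
  · have h0 : n.toNat = 0 := by omega
    rw [h0]
    have : PySem.List.pyRange 0 n = [] := by
      apply List.eq_nil_iff_forall_not_mem.mpr
      intro x hx
      rw [PySem.List.mem_pyRange_one] at hx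
      omega
    simp [this]
  · conv_lhs => rw [show n = ((n.toNat : Nat) : Int) by omega]
    exact PySem.List.pyRange_zero_natCast _


-- invariant of B's online scan: running best = max so far, ties = all tying indices so far
lemma pvScan_inv (u : Int → Int) (L : List Int) : ∀ (b : Int) (pre : List Int),
    (∀ x ∈ pre, u x ≤ b) →
    L.foldl (pvScanStep u) (some b, pre.filter (fun x => decide (u x = b)))
      = (some (L.foldl (fun a x => max a (u x)) b),
         (pre ++ L).filter (fun x => decide (u x = L.foldl (fun a x => max a (u x)) b))) := by
  induction L with
  | nil =>
    intro b pre h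
    simp only [List.foldl_nil, List.append_nil]
    rfl
  | cons j L ih =>
    intro b pre h
    rcases lt_trichotomy b (u j) with hgt | heq | hlt
    · have hstep : pvScanStep u (some b, pre.filter (fun x => decide (u x = b))) j
          = (some (u j), (pre ++ [j]).filter (fun x => decide (u x = u j))) := by
        have hpre : pre.filter (fun x => decide (u x = u j)) = [] := by
          apply List.filter_eq_nil_iff.mpr
          intro x hx
          have := h x hx
          simp; omega
        simp [pvScanStep, hgt, hpre]
      rw [List.foldl_cons, hstep,
        ih (u j) (pre ++ [j]) (by intro x hx; rcases List.mem_append.mp hx with hx | hx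
                                  · exact le_of_lt (lt_of_le_of_lt (h x hx) hgt)
                                  · simp at hx; simp [hx])]
      have hmax : max b (u j) = u j := by omega
      simp [hmax, List.append_assoc]
    · have hstep : pvScanStep u (some b, pre.filter (fun x => decide (u x = b))) j
          = (some b, (pre ++ [j]).filter (fun x => decide (u x = b))) := by
        simp [pvScanStep, ← heq]
      rw [List.foldl_cons, hstep,
        ih b (pre ++ [j]) (by intro x hx; rcases List.mem_append.mp hx with hx | hx
                              · exact h x hx
                              · simp at hx; simp [hx, ← heq])]
      have hmax : max b (u j) = b := by omega
      simp [hmax, List.append_assoc]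
    · have hstep : pvScanStep u (some b, pre.filter (fun x => decide (u x = b))) j
          = (some b, (pre ++ [j]).filter (fun x => decide (u x = b))) := by
        have hj : ([j].filter (fun x => decide (u x = b))) = [] := by simp; omega
        simp [pvScanStep, show ¬ (u j > b) by omega, show ¬ (u j = b) by omega,
          List.filter_append, hj]
      rw [List.foldl_cons, hstep,
        ih b (pre ++ [j]) (by intro x hx; rcases List.mem_append.mp hx with hx | hx
                              · exact h x hx
                              · simp at hx; subst hx; omega)]
      have hmax : max b (u j) = b := by omega
      simp [hmax, List.append_assoc]

lemma pvScan_eval (u : Int → Int) (j : Int) (L : List Int) :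
    (j :: L).foldl (pvScanStep u) (none, [])
      = (some (L.foldl (fun a x => max a (u x)) (u j)),
         (j :: L).filter (fun x => decide (u x = L.foldl (fun a x => max a (u x)) (u j)))) := by
  have h1 : pvScanStep u (none, []) j = (some (u j), [j].filter (fun x => decide (u x = u j))) := by
    simp [pvScanStep]
  rw [List.foldl_cons, h1, pvScan_inv u L (u j) [j] (by intro x hx; simp at hx; simp [hx])]
  simp

-- A's inner loop writes only row k; it equals one set of the fully marked row
lemma pvInner_sets (L : List Int) : ∀ (C : List (List Int)) (k : Nat), k < C.length →
    L.foldl (fun C j => C.set k (((PySem.List.pyGet? C (k : Int)).getD []).set j.toNat 1)) C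
      = C.set k (L.foldl (fun r j => r.set j.toNat 1) ((PySem.List.pyGet? C (k : Int)).getD [])) := by
  induction L with
  | nil =>
    intro C k hk
    rw [List.foldl_nil, List.foldl_nil, PySem.List.pyGet?_natCast, List.getElem?_eq_getElem hk]
    simp
  | cons j L ih =>
    intro C k hk
    rw [List.foldl_cons, List.foldl_cons]
    have hget : (PySem.List.pyGet? (C.set k (((PySem.List.pyGet? C (k : Int)).getD []).set j.toNat 1)) (k : Int)).getD []
        = ((PySem.List.pyGet? C (k : Int)).getD []).set j.toNat 1 := by
      rw [PySem.List.pyGet?_natCast, List.getElem?_set_self hk]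
      rfl
    rw [ih _ k (by simpa using hk), hget, List.set_set]

-- one iteration of A, with m ≥ 1 and current row k still the zero row, appends B's row
lemma pvStepA_eq (m : Int) (V : List (List Int)) (P : List Int) (hm : 1 ≤ m)
    (C : List (List Int)) (k : Nat) (hk : k < C.length)
    (hC : C[k]? = some (List.replicate m.toNat (0 : Int))) :
    pvStepA m V P C (k : Int)
      = C.set k (pvRowB m (pvUtil ((PySem.List.pyGet? V (k : Int)).getD []) P)) := by
  have hcons : PySem.List.pyRange 0 m = 0 :: PySem.List.pyRange 1 m :=
    PySem.List.pyRange_one_cons (by omega)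
  simp only [pvStepA]
  split
  · next hnone =>
      exfalso
      rw [PySem.List.max?_eq_none_iff, List.map_eq_nil_iff, hcons] at hnone
      exact List.cons_ne_nil _ _ hnone
  · next mu hmu =>
      rw [hcons, List.map_cons, PySem.List.max?_id_cons, Option.some.injEq] at hmu
      rw [PySem.List.foldl_ite_eq_foldl_filter]
      simp only [Int.toNat_natCast]
      rw [pvInner_sets _ C k hk]
      have hrow : (PySem.List.pyGet? C (k : Int)).getD [] = List.replicate m.toNat (0 : Int) := by
        rw [PySem.List.pyGet?_natCast, hC]; rfl
      rw [hrow]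
      simp only [pvRowB]
      rw [hcons, pvScan_eval]
      rw [List.foldl_map] at hmu
      subst hmu
      rfl

-- A's outer fold over the still-zero suffix produces the rows one by one
lemma pvOuterA (m : Int) (V : List (List Int)) (P : List Int) (hm : 1 ≤ m) :
    ∀ (cnt s : Nat) (done : List (List Int)), done.length = s →
    ((List.range' s cnt).map (Int.ofNat)).foldl (pvStepA m V P)
        (done ++ List.replicate cnt (List.replicate m.toNat (0 : Int)))
      = done ++ (List.range' s cnt).map
          (fun k : Nat => pvRowB m (pvUtil ((PySem.List.pyGet? V (Int.ofNat k)).getD []) P)) := by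
  intro cnt
  induction cnt with
  | zero => intro s done hs; simp
  | succ cnt ih =>
    intro s done hs
    rw [List.range'_succ, List.map_cons, List.foldl_cons, List.replicate_succ]
    simp only [Int.ofNat_eq_natCast]
    set z := List.replicate m.toNat (0 : Int) with hz
    have hk : s < (done ++ z :: List.replicate cnt z).length := by
      simp [List.length_append]; omega
    have hC : (done ++ z :: List.replicate cnt z)[s]? = some z := by
      rw [List.getElem?_append_right (by omega)]
      simp [hs]
    rw [pvStepA_eq m V P hm _ s hk hC]
    have hset : (done ++ z :: List.replicate cnt z).set s
          (pvRowB m (pvUtil ((PySem.List.pyGet? V (s : Int)).getD []) P))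
        = (done ++ [pvRowB m (pvUtil ((PySem.List.pyGet? V (s : Int)).getD []) P)])
            ++ List.replicate cnt z := by
      rw [List.set_append_right s _ (by omega)]
      simp [hs]
    rw [hset, ih (s + 1) _ (by simp [hs])]
    simp

-- ===== VERDICT (by name: the statement is the Claim_ definition above) =====
theorem compute_preferred_choice_graph_py_spec : Claim_equal_compute_preferred_choice_graph_py := by
  unfold Claim_equal_compute_preferred_choice_graph_py
  intro n m V P _ hpre
  unfold Spec_compute_preferred_choice_graph_py
  simp only [compute_preferred_choice_graph_py, compute_preferred_choice_graph_py_alt]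
  rcases hpre with hn | ⟨hm, -, -, -⟩
  · have h0 : n.toNat = 0 := by omega
    rw [pvRange_zero_eq n, h0]
    simp
  · have hzrow : (PySem.List.pyRange 0 m).map (fun _ => (0 : Int))
        = List.replicate m.toNat (0 : Int) := by
      rw [pvRange_zero_eq m]
      simp [List.eq_replicate_iff]
    have hstepB : pvStepB m V P = fun C i =>
        C ++ [pvRowB m (pvUtil ((PySem.List.pyGet? V i).getD []) P)] := rfl
    rw [hstepB, PySem.List.foldl_append_singleton_eq_map]
    rw [pvRange_zero_eq n, List.range_eq_range']
    have hC0 : ((List.range' 0 n.toNat).map (Int.ofNat)).map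
          (fun _ => (PySem.List.pyRange 0 m).map (fun _ => (0 : Int)))
        = [] ++ List.replicate n.toNat (List.replicate m.toNat (0 : Int)) := by
      simp [hzrow, List.eq_replicate_iff]
    rw [hC0, pvOuterA m V P hm n.toNat 0 [] rfl]
    simp [List.map_map, Function.comp_def, Int.ofNat_eq_natCast]
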